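-- pv_equiv track=rewrite | github.com/iorymaeda/Bewise.ai | utils/processing.py | crop_text_to_patches
-- ===== SOURCE A (Python) =====
-- def split(text: str) -> str:
--     return text.replace("-", " ").replace("_", " ").split()
--
-- def crop_text_to_patches(text: str, slice_range:int=2) -> list:
--     query_slices = []
--     query_words = split(text)
--
--     if len(query_words) < slice_range:
--         query_slices.append(text)
--
--     else:
--         for batch in range(0, len(query_words)-(slice_range-1)):
--             s = ""
--             for _ in range(slice_range):
--                 s+= query_words[batch + _] + " "
--             s = s.strip()
--
--             query_slices.append( s )
--
--     return query_slices
-- ===== SOURCE B (Python) =====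
-- def split(text: str) -> str:
--     return text.replace("-", " ").replace("_", " ").split()
--
-- def crop_text_to_patches(text: str, slice_range: int = 2) -> list:
--     query_words = split(text)
--     if len(query_words) < slice_range:
--         return [text]
--     windows = zip(*(query_words[i:] for i in range(slice_range)))
--     return [" ".join(w) for w in windows]
-- ===== Notes on version B (the rewrite author's own statement) =====
-- stated objective: idiomatic
-- what changed: Replaces A's nested index-and-concatenate-then-strip loops by zipping slice_range shifted word-list views and joining each window with a single space.
-- intended difference: On slice_range <= 0, A returns len(words)-slice_range+1 copies of the empty string (leftover state of its empty inner loop), while B returns [] (no windows), which is the intended value for a degenerate window size. — e.g. on crop_text_to_patches("a b", 0): A returns ["", "", ""], B returns []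
import Mathlib
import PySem

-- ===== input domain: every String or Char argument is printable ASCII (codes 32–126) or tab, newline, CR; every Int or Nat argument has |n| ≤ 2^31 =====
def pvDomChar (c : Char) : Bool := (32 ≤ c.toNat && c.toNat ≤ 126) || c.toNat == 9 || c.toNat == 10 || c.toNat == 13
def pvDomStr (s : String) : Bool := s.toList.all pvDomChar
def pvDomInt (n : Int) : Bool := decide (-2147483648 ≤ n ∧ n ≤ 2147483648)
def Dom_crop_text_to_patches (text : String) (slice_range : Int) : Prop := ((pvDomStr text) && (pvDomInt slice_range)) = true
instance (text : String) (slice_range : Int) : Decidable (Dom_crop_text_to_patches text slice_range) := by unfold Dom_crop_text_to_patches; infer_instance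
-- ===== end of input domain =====

-- B replaces A's nested index-and-concatenate-then-strip loops by zipping slice_range shifted
-- word-list views and joining each window with a single space (idiomatic; same asymptotic cost).

-- ===== PORT A =====
-- helper `split` of the Python module (shared by A and B, as in the source)
def pvSplit (text : String) : List String :=
  PySem.Str.split₀ (PySem.Str.replace (PySem.Str.replace text "-" " ") "_" " ")

def crop_text_to_patches (text : String) (slice_range : Int) : List String :=
  let query_words := pvSplit text
  if (query_words.length : Int) < slice_range then
    [text]
  else
    (PySem.List.pyRange 0 ((query_words.length : Int) - (slice_range - 1)) 1).foldl
      (fun query_slices batch =>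
        let s := (PySem.List.pyRange 0 slice_range 1).foldl
          -- query_words[batch + _] : always in range here (PySem.List.pyGetD is exact in range)
          (fun s j => s ++ PySem.List.pyGetD query_words (batch + j) "" ++ " ") ""
        query_slices ++ [PySem.Str.strip s]) []

-- ===== PORT B =====
-- termination measure lemma for pyZipN (cited by its decreasing_by)
theorem pyZipN_dec {α : Type} (ls : List (List α)) (h1 : ls ≠ [])
    (h2 : ls.all (fun l => !l.isEmpty) = true) :
    ((ls.map (fun l => l.tail)).map List.length).sum < (ls.map List.length).sum := by
  induction ls with
  | nil => exact absurd rfl h1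
  | cons l t ih =>
    simp only [List.all_cons, Bool.and_eq_true] at h2
    have hl : l ≠ [] := by
      intro hnil; subst hnil; simp at h2
    have hlen : l.tail.length < l.length := by
      cases l with
      | nil => exact absurd rfl hl
      | cons a l' => simp
    have hle : ∀ (u : List (List α)),
        ((u.map (fun l => l.tail)).map List.length).sum ≤ (u.map List.length).sum := by
      intro u
      induction u with
      | nil => simp
      | cons v w ihw =>
        simp only [List.map_cons, List.sum_cons]
        have : v.tail.length ≤ v.length := by cases v <;> simp
        omega
    have := hle t
    simp only [List.map_cons, List.sum_cons]
    omega

-- Python's zip(*its): repeatedly take one element of every list until some list is exhausted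
def pyZipN {α : Type} [Inhabited α] (ls : List (List α)) : List (List α) :=
  if h : ls ≠ [] ∧ ls.all (fun l => !l.isEmpty) = true then
    ls.map (fun l => l.head!) :: pyZipN (ls.map (fun l => l.tail))
  else []
termination_by (ls.map List.length).sum
decreasing_by exact pyZipN_dec ls h.1 h.2

def crop_text_to_patches_alt (text : String) (slice_range : Int) : List String :=
  let query_words := pvSplit text
  if (query_words.length : Int) < slice_range then
    [text]
  else
    (pyZipN ((PySem.List.pyRange 0 slice_range 1).map
        (fun i => PySem.List.slice query_words (some i) none))).map
      (fun w => PySem.Str.join " " w)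

-- ===== PRECONDITION & SPEC =====
-- On slice_range ≤ 0, A falls into its else branch and returns len(words)-slice_range+1 copies of
-- the empty string (leftover of the empty inner loop), which is evidently wrong for word windows;
-- B returns [] there (no windows), the intended value.
def D_crop_text_to_patches (text : String) (slice_range : Int) : Prop := slice_range ≤ 0
instance (text : String) (slice_range : Int) : Decidable (D_crop_text_to_patches text slice_range) := by
  unfold D_crop_text_to_patches; infer_instance

def Spec_crop_text_to_patches (text : String) (slice_range : Int) (out : List String) : Prop :=
  ¬ D_crop_text_to_patches text slice_range → out = crop_text_to_patches_alt text slice_range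
instance (text : String) (slice_range : Int) (out : List String) : Decidable (Spec_crop_text_to_patches text slice_range out) := by
  unfold Spec_crop_text_to_patches; infer_instance

def pvDiffWitness_crop_text_to_patches : String × Int := ("a b", 0)
def pvDiffWitnessOut_crop_text_to_patches : (List String) × (List String) := (["", "", ""], [])

-- ===== CLAIM (what is proved, stated in full; the proofs are below) =====
def Claim_unchanged_crop_text_to_patches : Prop := ∀ (text : String) (slice_range : Int), Dom_crop_text_to_patches text slice_range → Spec_crop_text_to_patches text slice_range (crop_text_to_patches text slice_range)
def Claim_changed_crop_text_to_patches : Prop := Dom_crop_text_to_patches (pvDiffWitness_crop_text_to_patches.1) (pvDiffWitness_crop_text_to_patches.2) ∧ D_crop_text_to_patches (pvDiffWitness_crop_text_to_patches.1) (pvDiffWitness_crop_text_to_patches.2) ∧ crop_text_to_patches (pvDiffWitness_crop_text_to_patches.1) (pvDiffWitness_crop_text_to_patches.2) = pvDiffWitnessOut_crop_text_to_patches.1 ∧ crop_text_to_patches_alt (pvDiffWitness_crop_text_to_patches.1) (pvDiffWitness_crop_text_to_patches.2) = pvDiffWitnessOut_crop_text_to_patches.2 ∧ pvDiffWitnessOut_crop_text_to_patches.1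 ≠ pvDiffWitnessOut_crop_text_to_patches.2
def Claim_exact_crop_text_to_patches : Prop := ∀ (text : String) (slice_range : Int), Dom_crop_text_to_patches text slice_range → D_crop_text_to_patches text slice_range → crop_text_to_patches text slice_range ≠ crop_text_to_patches_alt text slice_range

-- ===== LEMMAS AND PROOFS =====

-- every word produced by Chars.split₀.go is nonempty and whitespace-free
theorem split₀_go_words (s : List Char) : ∀ (cur : List Char) (acc : List (List Char)),
    (∀ c ∈ cur, PySem.Chars.isspace c = false) →
    (∀ w ∈ acc, w ≠ [] ∧ ∀ c ∈ w, PySem.Chars.isspace c = false) →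
    ∀ w ∈ PySem.Chars.split₀.go s cur acc, w ≠ [] ∧ ∀ c ∈ w, PySem.Chars.isspace c = false := by
  induction s with
  | nil =>
    intro cur acc hcur hacc w hw
    unfold PySem.Chars.split₀.go at hw
    by_cases h : cur.isEmpty
    · simp [h] at hw; exact hacc w (by simpa using hw)
    · simp [h] at hw
      rcases hw with h1 | h2
      · exact hacc w h1
      · subst h2
        refine ⟨by simpa using (by simpa [List.isEmpty_iff] using h : cur ≠ []), ?_⟩
        intro ch hch; exact hcur ch (List.mem_reverse.mp hch)
  | cons c rest ih =>
    intro cur acc hcur hacc w hw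
    unfold PySem.Chars.split₀.go at hw
    by_cases hs : PySem.Chars.isspace c
    · by_cases hc : cur.isEmpty
      · simp [hs, hc] at hw
        exact ih [] acc (by simp) hacc w hw
      · simp [hs, hc] at hw
        refine ih [] (cur.reverse :: acc) (by simp) ?_ w hw
        intro w' hw'
        rcases List.mem_cons.mp hw' with rfl | hmem
        · constructor
          · simpa using (by simpa [List.isEmpty_iff] using hc : cur ≠ [])
          · intro ch hch; exact hcur ch (List.mem_reverse.mp hch)
        · exact hacc w' hmem
    · simp [hs] at hw
      refine ih (c :: cur) acc ?_ hacc w hw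
      intro ch hch
      rcases List.mem_cons.mp hch with rfl | hmem
      · simpa using hs
      · exact hcur ch hmem

theorem pvSplit_words (text : String) :
    ∀ w ∈ pvSplit text, w.toList ≠ [] ∧ ∀ c ∈ w.toList, PySem.Chars.isspace c = false := by
  intro w hw
  have hmem : w.toList ∈ PySem.Chars.split₀
      (PySem.Str.replace (PySem.Str.replace text "-" " ") "_" " ").toList := by
    rw [← PySem.Str.split₀_map_toList]
    exact List.mem_map_of_mem hw
  exact split₀_go_words _ [] [] (by simp) (by simp) _ hmem

-- heads of the shifted views are take
theorem map_headI_drop {α : Type} [Inhabited α] (ws : List α) (r : Nat) (h : r ≤ ws.length) :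
    (List.range r).map (fun i => (ws.drop i).head!) = ws.take r := by
  induction r with
  | zero => simp
  | succ k ih =>
    rw [List.range_succ, List.map_append, ih (by omega), List.take_add_one]
    have hk : k < ws.length := by omega
    have hd : List.drop k ws = ws[k] :: List.drop (k+1) ws := List.drop_eq_getElem_cons hk
    simp only [List.map_cons, List.map_nil, List.getElem?_eq_getElem hk, Option.toList_some, hd,
      List.head!]

-- pyZipN of the slice_range shifted views = the list of all slice_range-windows
theorem pyZipN_drops {α : Type} [Inhabited α] (ws : List α) (r : Nat) (h1 : 1 ≤ r)
    (h2 : r ≤ ws.length) :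
    pyZipN ((List.range r).map (fun i => ws.drop i)) =
      (List.range (ws.length - r + 1)).map (fun b => (ws.drop b).take r) := by
  induction ws with
  | nil => simp at h2; omega
  | cons a t ih =>
    have h2' : r ≤ t.length + 1 := by simpa using h2
    rw [pyZipN]
    have hcond : ((List.range r).map (fun i => (a :: t).drop i) ≠ [] ∧
        ((List.range r).map (fun i => (a :: t).drop i)).all (fun l => !l.isEmpty) = true) := by
      refine ⟨by simpa using List.range_eq_nil.not.mpr (by omega), ?_⟩
      simp only [List.all_map, List.all_eq_true]
      intro i hi
      have hir : i < r := List.mem_range.mp hi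
      have hne : List.drop i (a :: t) ≠ [] := by
        intro hD
        rw [List.drop_eq_nil_iff] at hD
        simp only [List.length_cons] at hD
        omega
      cases hD : List.drop i (a :: t) with
      | nil => exact absurd hD hne
      | cons x xs => simp [Function.comp, hD]
    rw [dif_pos hcond]
    rw [List.map_map, List.map_map]
    have hheads : (List.range r).map ((fun l => l.head!) ∘ (fun i => (a :: t).drop i)) =
        (a :: t).take r := map_headI_drop (a :: t) r h2
    have htails : (List.range r).map ((fun l => l.tail) ∘ (fun i => (a :: t).drop i)) =
        (List.range r).map (fun i => t.drop i) := by
      apply List.map_congr_left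
      intro i hi
      simp [Function.comp, List.tail_drop, List.drop_succ_cons]
    rw [hheads, htails]
    by_cases hrt : r ≤ t.length
    · rw [ih hrt]
      have hlen : (a :: t).length - r + 1 = (t.length - r + 1) + 1 := by simp; omega
      conv_rhs => rw [hlen, List.range_succ_eq_map, List.map_cons, List.map_map]
      congr 1
    · have hr : r = t.length + 1 := by omega
      rw [pyZipN, dif_neg]
      · have hlen : (a :: t).length - r + 1 = 1 := by simp; omega
        rw [hlen]
        simp
      · rintro ⟨-, hall⟩
        simp only [List.all_map, List.all_eq_true] at hall
        have := hall t.length (List.mem_range.mpr (by omega))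
        simp [Function.comp] at this

-- A's inner loop is a fold over the window's words
theorem innerA_fold (ws : List String) (b : Nat) (k : Nat) (hk : b + k ≤ ws.length) (s0 : String) :
    (List.range k).foldl (fun s j => s ++ ws.getD (b + j) "" ++ " ") s0 =
      ((ws.drop b).take k).foldl (fun s w => s ++ w ++ " ") s0 := by
  induction k with
  | zero => simp
  | succ m ih =>
    have hbm : b + m < ws.length := by omega
    rw [List.range_succ, List.foldl_append, ih (by omega), List.take_add_one]
    have hget : (ws.drop b)[m]? = some ws[b + m] := by
      rw [List.getElem?_drop]
      exact List.getElem?_eq_getElem (by omega)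
    rw [hget, List.foldl_append]
    simp [List.getD, List.getElem?_eq_getElem hbm]

-- A's trailing-space concatenation, at the char level
theorem fold_toList (chunk : List String) (s0 : String) :
    (chunk.foldl (fun s w => s ++ w ++ " ") s0).toList =
      s0.toList ++ (chunk.map (fun w => w.toList ++ [' '])).flatten := by
  induction chunk generalizing s0 with
  | nil => simp
  | cons w t ih => simp [ih, String.toList_append]

theorem join_ne_nil (u : List Char) (rest : List (List Char)) (hu : u ≠ []) :
    PySem.Chars.join [' '] (u :: rest) ≠ [] := by
  cases rest with
  | nil => simpa [PySem.Chars.join_singleton] using hu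
  | cons v rest' =>
    rw [PySem.Chars.join_cons_cons]
    simp [hu]

theorem rstrip_part (chunk : List (List Char)) (hne : chunk ≠ [])
    (hw : ∀ w ∈ chunk, w ≠ [] ∧ ∀ c ∈ w, PySem.Chars.isspace c = false) :
    List.dropWhile PySem.Chars.isspace ((chunk.map (fun w => w ++ [' '])).flatten).reverse =
      (PySem.Chars.join [' '] chunk).reverse := by
  induction chunk with
  | nil => exact absurd rfl hne
  | cons w t ih =>
    obtain ⟨hwne, hwsp⟩ := hw w (by simp)
    have hlast : ∀ c ∈ w.reverse, c ∈ w := by intro c hc; exact List.mem_reverse.mp hc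
    have hdw : List.dropWhile PySem.Chars.isspace w.reverse = w.reverse := by
      cases hwr : w.reverse with
      | nil => simp
      | cons c cs =>
        rw [List.dropWhile_cons_of_neg]
        have : c ∈ w := hlast c (by rw [hwr]; simp)
        simp [hwsp c this]
    cases t with
    | nil =>
      simp only [List.map_cons, List.map_nil, List.flatten_cons, List.flatten_nil,
        List.append_nil, List.reverse_append, List.reverse_cons, List.reverse_nil,
        List.nil_append, List.singleton_append, PySem.Chars.join_singleton]
      rw [List.dropWhile_cons_of_pos (by decide)]
      exact hdw
    | cons u t' =>
      have hih := ih (by simp) (fun w' hw' => hw w' (by simp [hw']))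
      have hfl : ((List.map (fun w => w ++ [' ']) (w :: u :: t')).flatten).reverse =
          ((List.map (fun w => w ++ [' ']) (u :: t')).flatten).reverse ++ (' ' :: w.reverse) := by
        simp [List.reverse_append]
      rw [hfl, List.dropWhile_append, hih]
      have hjne : PySem.Chars.join [' '] (u :: t') ≠ [] :=
        join_ne_nil u t' (hw u (by simp)).1
      rw [if_neg (by simpa using fun h => hjne (by simpa using h))]
      rw [PySem.Chars.join_cons_cons]
      simp [List.reverse_append]

theorem strip_flatten (chunk : List (List Char)) (hne : chunk ≠ [])
    (hw : ∀ w ∈ chunk, w ≠ [] ∧ ∀ c ∈ w, PySem.Chars.isspace c = false) :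
    PySem.Chars.strip ((chunk.map (fun w => w ++ [' '])).flatten) =
      PySem.Chars.join [' '] chunk := by
  unfold PySem.Chars.strip PySem.Chars.lstrip PySem.Chars.rstrip
  have hl : List.dropWhile PySem.Chars.isspace ((chunk.map (fun w => w ++ [' '])).flatten) =
      (chunk.map (fun w => w ++ [' '])).flatten := by
    cases chunk with
    | nil => exact absurd rfl hne
    | cons w t =>
      obtain ⟨hwne, hwsp⟩ := hw w (by simp)
      cases hWc : w with
      | nil => exact absurd hWc hwne
      | cons c cs =>
        simp only [List.map_cons, List.flatten_cons, List.cons_append]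
        rw [List.dropWhile_cons_of_neg]
        simp [hwsp c (by rw [hWc]; simp)]
  rw [hl, rstrip_part chunk hne hw, List.reverse_reverse]

-- strip of the trailing-space concatenation is the " "-join
theorem strip_fold_join (chunk : List String) (hne : chunk ≠ [])
    (hw : ∀ w ∈ chunk, w.toList ≠ [] ∧ ∀ c ∈ w.toList, PySem.Chars.isspace c = false) :
    PySem.Str.strip (chunk.foldl (fun s w => s ++ w ++ " ") "") = PySem.Str.join " " chunk := by
  apply String.toList_inj.mp
  rw [PySem.Str.toList_strip, fold_toList, PySem.Str.toList_join]
  have hmm : chunk.map (fun w => w.toList ++ [' ']) =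
      (chunk.map String.toList).map (fun w => w ++ [' ']) := by rw [List.map_map]; rfl
  have hsep : (" " : String).toList = [' '] := rfl
  have hempty : ("" : String).toList = ([] : List Char) := rfl
  rw [hempty, List.nil_append, hmm, hsep]
  apply strip_flatten
  · simpa using hne
  · intro w hwm
    obtain ⟨w', hw', rfl⟩ := List.mem_map.mp hwm
    exact hw w' hw'

-- pyRange 0 r 1 is empty for r ≤ 0
theorem pyRange_nonpos (r : Int) (h : r ≤ 0) : PySem.List.pyRange 0 r 1 = [] := by
  simp [PySem.List.pyRange]
  omega

-- crop_text_to_patches_alt returns [] whenever slice_range ≤ 0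
theorem alt_nonpos (text : String) (r : Int) (h : r ≤ 0) :
    crop_text_to_patches_alt text r = [] := by
  have hn : ¬ (((pvSplit text).length : Int) < r) := by
    have : (0 : Int) ≤ ((pvSplit text).length : Int) := Int.natCast_nonneg _
    omega
  simp only [crop_text_to_patches_alt]
  rw [if_neg hn, pyRange_nonpos r h, List.map_nil, pyZipN]
  simp

-- ===== VERDICT (by name: the statement is the Claim_ definition above) =====
theorem crop_text_to_patches_spec : Claim_unchanged_crop_text_to_patches := by
  intro text slice_range hDom
  unfold Spec_crop_text_to_patches
  intro hnD
  unfold D_crop_text_to_patches at hnD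
  obtain ⟨rn, rfl⟩ : ∃ rn : Nat, slice_range = (rn : Int) :=
    ⟨slice_range.toNat, by omega⟩
  have hr1 : 1 ≤ rn := by omega
  simp only [crop_text_to_patches, crop_text_to_patches_alt]
  by_cases hcase : (((pvSplit text).length : Int) < (rn : Int))
  · rw [if_pos hcase, if_pos hcase]
  · rw [if_neg hcase, if_neg hcase]
    have hrn : rn ≤ (pvSplit text).length := by exact_mod_cast not_lt.mp hcase
    -- B side
    have hB : ((PySem.List.pyRange 0 (rn : Int) 1).map
        (fun i => PySem.List.slice (pvSplit text) (some i) none)) =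
        (List.range rn).map (fun i => (pvSplit text).drop i) := by
      rw [PySem.List.pyRange_zero_natCast, List.map_map]
      apply List.map_congr_left
      intro i hi
      simp [Function.comp, PySem.List.slice_from_natCast]
    rw [hB, pyZipN_drops (pvSplit text) rn hr1 hrn, List.map_map]
    -- A side
    have harg : ((pvSplit text).length : Int) - ((rn : Int) - 1) =
        (((pvSplit text).length - rn + 1 : Nat) : Int) := by push_cast; omega
    rw [harg, PySem.List.pyRange_zero_natCast ((pvSplit text).length - rn + 1),
      List.foldl_map]
    simp only [PySem.List.foldl_append_singleton_eq_map, List.nil_append]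
    apply List.map_congr_left
    intro b hb
    have hble : b + rn ≤ (pvSplit text).length := by
      have := List.mem_range.mp hb
      omega
    -- inner loop of A at window b
    have hinner : (PySem.List.pyRange 0 (rn : Int) 1).foldl
        (fun s j => s ++ PySem.List.pyGetD (pvSplit text) ((b : Int) + j) "" ++ " ") "" =
        (((pvSplit text).drop b).take rn).foldl (fun s w => s ++ w ++ " ") "" := by
      rw [PySem.List.pyRange_zero_natCast, List.foldl_map]
      have hcongr : (List.range rn).foldl
          (fun s (j : Nat) => s ++ PySem.List.pyGetD (pvSplit text) ((b : Int) + (j : Int)) "" ++ " ") "" =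
          (List.range rn).foldl (fun s j => s ++ (pvSplit text).getD (b + j) "" ++ " ") "" := by
        apply PySem.List.foldl_congr_mem
        intro s j hj
        have : ((b : Int) + (j : Int)) = ((b + j : Nat) : Int) := by push_cast; ring
        rw [this, PySem.List.pyGetD_natCast]
      rw [hcongr, innerA_fold (pvSplit text) b rn hble]
    rw [hinner]
    -- window words are nonempty and whitespace-free
    have hchunk_ne : ((pvSplit text).drop b).take rn ≠ [] := by
      intro hc
      have := congrArg List.length hc
      simp at this
      omega
    have hchunk_w : ∀ w ∈ ((pvSplit text).drop b).take rn,
        w.toList ≠ [] ∧ ∀ c ∈ w.toList, PySem.Chars.isspace c = false := by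
      intro w hwm
      exact pvSplit_words text w (List.mem_of_mem_drop (List.mem_of_mem_take hwm))
    exact strip_fold_join _ hchunk_ne hchunk_w

set_option maxHeartbeats 2000000 in
theorem crop_text_to_patches_changed : Claim_changed_crop_text_to_patches := by
  unfold Claim_changed_crop_text_to_patches
  refine ⟨by decide, by decide, by decide, ?_, by decide⟩
  show crop_text_to_patches_alt "a b" 0 = pvDiffWitnessOut_crop_text_to_patches.2
  rw [alt_nonpos "a b" 0 (by omega)]
  rfl

set_option maxHeartbeats 1000000 in
theorem crop_text_to_patches_tight : Claim_exact_crop_text_to_patches := by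
  intro text slice_range hDom hD
  unfold D_crop_text_to_patches at hD
  rw [alt_nonpos text slice_range hD]
  have hn : ¬ (((pvSplit text).length : Int) < slice_range) := by
    have : (0 : Int) ≤ ((pvSplit text).length : Int) := Int.natCast_nonneg _
    omega
  simp only [crop_text_to_patches]
  rw [if_neg hn]
  have harg : ((pvSplit text).length : Int) - (slice_range - 1) =
      ((((pvSplit text).length : Int) - slice_range + 1).toNat : Int) := by omega
  rw [harg, PySem.List.pyRange_zero_natCast, List.foldl_map]
  simp only [PySem.List.foldl_append_singleton_eq_map, List.nil_append]
  intro hcontr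
  have hlen := congrArg List.length hcontr
  rw [List.length_map, List.length_range] at hlen
  simp only [List.length_nil] at hlen
  omega
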